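-- pv_equiv track=rewrite | github.com/cymdd/MSATra | utils.py | balance_mapping
-- ===== SOURCE A (Python) =====
-- def balance_mapping(large_number,small_number):# 计算整除值
--     # large_number = len(large_list)
--     # small_number = len(small_list)
--     quotient = large_number // small_number
--     # 计算余数值
--     remainder = large_number % small_number
--
--     # 初始化映射结果的列表
--     mapping = []
--     currentIndex=0
--     # small_number
--     for right in range(small_number):
--         # 计算当前小数项应该匹配的大数项数量
--         current_match_count = quotient + (1 if remainder>0 else 0)
--         current_match_count += currentIndex
--         # 对于每个匹配的大数项进行添加
--         for left in range(currentIndex,current_match_count):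
--             # 添加映射
--             mapping.append([left,right])
--         currentIndex = current_match_count
--         remainder-=1
--     return mapping
-- ===== SOURCE B (Python) =====
-- def balance_mapping(large_number, small_number):
--     quotient = large_number // small_number
--     remainder = large_number % small_number
--     boundary = remainder * (quotient + 1)
--     mapping = []
--     for left in range(large_number):
--         if left < boundary:
--             right = left // (quotient + 1)
--         else:
--             right = remainder + (left - boundary) // quotient
--         mapping.append([left, right])
--     return mapping
-- ===== Notes on version B (the rewrite author's own statement) =====
-- stated objective: alternative
-- what changed: Replaces A's nested outer-over-buckets/inner-over-items filling (with mutable currentIndex and decremented remainder) by a single flat loop over the items that computes each item's bucket with a closed-form quotient formula; Pre_ excludes negative small_number with positive large_number, a meaningless bucket count on which A's empty list is an accident of range() over a negative number.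
-- outside the precondition, e.g. on balance_mapping(5, -2): A returns [], B returns [[0, 0], [1, -1], [2, -1], [3, -2], [4, -2]]
import Mathlib
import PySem

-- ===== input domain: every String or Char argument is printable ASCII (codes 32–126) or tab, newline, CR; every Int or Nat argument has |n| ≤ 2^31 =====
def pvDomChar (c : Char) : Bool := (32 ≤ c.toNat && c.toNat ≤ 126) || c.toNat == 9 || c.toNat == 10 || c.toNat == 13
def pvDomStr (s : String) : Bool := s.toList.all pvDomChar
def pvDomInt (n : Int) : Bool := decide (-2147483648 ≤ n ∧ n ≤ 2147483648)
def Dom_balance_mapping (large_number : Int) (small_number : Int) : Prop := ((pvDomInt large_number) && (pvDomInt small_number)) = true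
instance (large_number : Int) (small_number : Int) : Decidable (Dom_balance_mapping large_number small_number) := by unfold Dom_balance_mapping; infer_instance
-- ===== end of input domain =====

-- B replaces A's nested bucket-filling loops by a single flat loop computing each item's
-- bucket with a closed-form quotient formula (objective: alternative decomposition).

-- ===== PORT A =====
-- one iteration of A's outer loop: state = (mapping, currentIndex, remainder)
def bmStep (quotient : Int) (st : List (List Int) × Int × Int) (right : Int) :
    List (List Int) × Int × Int :=
  let cnt := quotient + (if st.2.2 > 0 then 1 else 0) + st.2.1
  ((PySem.List.pyRange st.2.1 cnt).foldl (fun m left => m ++ [[left, right]]) st.1, cnt, st.2.2 - 1)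

def balance_mapping (large_number : Int) (small_number : Int) : List (List Int) :=
  let quotient := PySem.Int.floordiv large_number small_number
  let remainder := PySem.Int.mod large_number small_number
  ((PySem.List.pyRange 0 small_number).foldl (bmStep quotient) ([], 0, remainder)).1

-- ===== PORT B =====
-- B's per-item bucket formula
def bmBucket (quotient remainder : Int) (left : Int) : List Int :=
  if left < remainder * (quotient + 1) then
    [left, PySem.Int.floordiv left (quotient + 1)]
  else
    [left, remainder + PySem.Int.floordiv (left - remainder * (quotient + 1)) quotient]

def balance_mapping_alt (large_number : Int) (small_number : Int) : List (List Int) :=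
  let quotient := PySem.Int.floordiv large_number small_number
  let remainder := PySem.Int.mod large_number small_number
  (PySem.List.pyRange 0 large_number).map (bmBucket quotient remainder)

-- ===== PRECONDITION & SPEC =====
-- A raises ZeroDivisionError when small_number == 0; Pre_ also excludes negative
-- small_number with positive large_number, a meaningless bucket count on which A's
-- empty list is an accident of range() over a negative number (B's flat formula
-- yields negative buckets there); with large_number ≤ 0 both are [] and it is kept.
def Pre_balance_mapping (large_number : Int) (small_number : Int) : Prop :=
  0 < small_number ∨ (small_number < 0 ∧ large_number ≤ 0)

instance (large_number : Int) (small_number : Int) :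
    Decidable (Pre_balance_mapping large_number small_number) := by
  unfold Pre_balance_mapping; infer_instance

def pvWitness_balance_mapping : Int × Int := (7, 3)

def Spec_balance_mapping (large_number : Int) (small_number : Int) (out : List (List Int)) : Prop :=
  out = balance_mapping_alt large_number small_number

instance (large_number : Int) (small_number : Int) (out : List (List Int)) :
    Decidable (Spec_balance_mapping large_number small_number out) := by
  unfold Spec_balance_mapping; infer_instance

-- ===== CLAIM (what is proved, stated in full; the proofs are below) =====
def Claim_equal_balance_mapping : Prop := ∀ (large_number : Int) (small_number : Int), Dom_balance_mapping large_number small_number → Pre_balance_mapping large_number small_number → Spec_balance_mapping large_number small_number (balance_mapping large_number small_number)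

-- ===== LEMMAS AND PROOFS =====

-- pyRange with an empty span
lemma pyRange_nil {a b : Int} (h : b ≤ a) : PySem.List.pyRange a b = [] := by
  simp [PySem.List.pyRange]; omega

-- the index where A's outer loop stands after k iterations
def bmCI (quotient remainder : Int) (k : Nat) : Int :=
  k * quotient + min (k : Int) remainder

-- the bucket formula is constant = k on the k-th segment (nonnegative quotient case)
lemma bmBucket_seg (q r : Int) (hq : 0 ≤ q) (k : Nat) (left : Int)
    (h1 : bmCI q r k ≤ left) (h2 : left < bmCI q r (k + 1)) :
    bmBucket q r left = [left, (k : Int)] := by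
  unfold bmCI at h1 h2
  push_cast at h1 h2
  unfold bmBucket
  by_cases hk : (k : Int) < r
  · rw [min_eq_left (le_of_lt hk)] at h1
    rw [min_eq_left (Int.add_one_le_iff.mpr hk)] at h2
    have hb : left < r * (q + 1) := by nlinarith
    rw [if_pos hb]
    have : PySem.Int.floordiv left (q + 1) = k := by
      rw [PySem.Int.floordiv_eq_iff_of_pos (by omega)]
      constructor <;> nlinarith
    rw [this]
  · have hrk : r ≤ (k : Int) := not_lt.mp hk
    rw [min_eq_right hrk] at h1
    rw [min_eq_right (by linarith)] at h2
    -- here k ≥ r; if q = 0 the segment is empty, contradiction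
    have hq0 : 0 < q := by
      rcases hq.lt_or_eq with h | h
      · exact h
      · exfalso; rw [← h] at h1 h2; simp at h1 h2; omega
    have hb : ¬ left < r * (q + 1) := by rw [not_lt]; nlinarith
    rw [if_neg hb]
    have : PySem.Int.floordiv (left - r * (q + 1)) q = (k : Int) - r := by
      rw [PySem.Int.floordiv_eq_iff_of_pos hq0]
      constructor <;> nlinarith
    rw [this, show r + ((k : Int) - r) = (k : Int) from by ring]

-- one outer-loop step preserves the invariant
lemma bmStep_inv (q r : Int) (hr : 0 ≤ r) (k : Nat) :
    bmStep q ((PySem.List.pyRange 0 (bmCI q r k)).map (bmBucket q r), bmCI q r k, r - k)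
      (k : Int)
    = ((PySem.List.pyRange 0 (bmCI q r (k + 1))).map (bmBucket q r),
        bmCI q r (k + 1), r - (k + 1 : Nat)) := by
  unfold bmStep
  have hcnt : q + (if r - (k : Int) > 0 then 1 else 0) + bmCI q r k = bmCI q r (k + 1) := by
    unfold bmCI
    push_cast
    split_ifs with h
    · rw [min_eq_left (by omega), min_eq_left (by omega)]; ring
    · rw [min_eq_right (by omega), min_eq_right (by omega)]; ring
  simp only [hcnt]
  rw [PySem.List.foldl_append_singleton_eq_map]
  simp only [Prod.mk.injEq]
  refine ⟨?_, trivial, by push_cast; ring⟩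
  by_cases hq : 0 ≤ q
  · have h0 : (0 : Int) ≤ bmCI q r k := by
      unfold bmCI
      have hm : (0 : Int) ≤ min (k : Int) r := le_min (Int.natCast_nonneg k) hr
      have hp : (0 : Int) ≤ (k : Int) * q := mul_nonneg (Int.natCast_nonneg k) hq
      linarith
    have h1 : bmCI q r k ≤ bmCI q r (k + 1) := by
      rw [← hcnt]; split_ifs <;> linarith
    rw [PySem.List.pyRange_one_append 0 (bmCI q r k) (bmCI q r (k + 1)) h0 h1,
        List.map_append]
    congr 1
    apply List.map_congr_left
    intro left hleft
    rw [PySem.List.mem_pyRange_one] at hleft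
    exact (bmBucket_seg q r hq k left hleft.1 hleft.2).symm
  · rw [not_le] at hq
    have h1 : bmCI q r (k + 1) ≤ bmCI q r k := by
      rw [← hcnt]; split_ifs <;> linarith
    have h2 : bmCI q r k ≤ 0 := by
      unfold bmCI
      have hkq : (k : Int) * q ≤ -(k : Int) := by nlinarith [Int.natCast_nonneg k]
      have hm : min (k : Int) r ≤ (k : Int) := min_le_left _ _
      linarith
    rw [pyRange_nil h2, pyRange_nil h1, pyRange_nil (le_trans h1 h2)]
    simp

-- the full outer loop, by induction on n
lemma bmLoop (q r : Int) (hr : 0 ≤ r) (n : Nat) :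
    (PySem.List.pyRange 0 (n : Int)).foldl (bmStep q) ([], 0, r)
    = ((PySem.List.pyRange 0 (bmCI q r n)).map (bmBucket q r), bmCI q r n, r - n) := by
  induction n with
  | zero =>
    simp only [Nat.cast_zero]
    rw [pyRange_nil (le_refl 0),
        pyRange_nil (by unfold bmCI; push_cast; simp)]
    simp [bmCI, min_eq_left hr]
  | succ m ih =>
    rw [show ((m + 1 : Nat) : Int) = (m : Int) + 1 by push_cast; ring,
        PySem.List.pyRange_one_succ_right (Int.natCast_nonneg m),
        List.foldl_append, ih]
    simp only [List.foldl]
    exact bmStep_inv q r hr m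

-- ===== VERDICT (by name: the statement is the Claim_ definition above) =====
theorem balance_mapping_spec : Claim_equal_balance_mapping := by
  intro L S _ hpre
  unfold Spec_balance_mapping balance_mapping balance_mapping_alt
  simp only []
  set q := PySem.Int.floordiv L S with hq
  set r := PySem.Int.mod L S with hr
  rcases hpre with hSpos | ⟨hSneg, hL0⟩
  case inr =>
    rw [pyRange_nil (le_of_lt hSneg), pyRange_nil hL0]
    rfl
  have hr0 : 0 ≤ r := PySem.Int.mod_nonneg L hSpos
  have hrS : r < S := PySem.Int.mod_lt L hSpos
  have hSn : ((S.toNat : Nat) : Int) = S := Int.toNat_of_nonneg (le_of_lt hSpos)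
  have hL : bmCI q r S.toNat = L := by
    unfold bmCI
    rw [hSn, min_eq_right (le_of_lt hrS)]
    have h := PySem.Int.floordiv_mul_add_mod L S
    rw [← hq, ← hr] at h
    linarith
  rw [← hSn, bmLoop q r hr0 S.toNat, hL]
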